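-- pv_equiv track=rewrite | github.com/RijksICTGilde/jinja-roos-components | src/jinja_roos_components/html_parser.py | _extract_jinja_block
-- ===== SOURCE A (Python) =====
-- from typing import List, Dict, Any, Optional, Tuple
--
-- def _extract_jinja_block(attrs_str: str, pos: int) -> Tuple[str, int]:
--     """
--     Extract a Jinja block starting at pos.
--     Handles {% ... %} and {{ ... }} blocks, including nested blocks.
--     Returns tuple of (block_content, position_after_block).
--     """
--     if pos + 1 >= len(attrs_str):
--         return "", pos
--
--     if attrs_str[pos:pos+2] == '{%':
--         end_tag = '%}'
--     elif attrs_str[pos:pos+2] == '{{':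
--         end_tag = '}}'
--     else:
--         return "", pos
--
--     start_tag = attrs_str[pos:pos+2]
--     search_pos = pos + 2
--     nesting = 1
--
--     while search_pos < len(attrs_str) - 1 and nesting > 0:
--         two_chars = attrs_str[search_pos:search_pos+2]
--         if two_chars == start_tag:
--             nesting += 1
--             search_pos += 2
--         elif two_chars == end_tag:
--             nesting -= 1
--             search_pos += 2
--         else:
--             search_pos += 1
--
--     return attrs_str[pos:search_pos], search_pos
-- ===== SOURCE B (Python) =====
-- _END_TAG = {'{%': '%}', '{{': '}}'}
--
--
-- def _extract_jinja_block(attrs_str: str, pos: int):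
--     """Extract a {%..%} or {{..}} block at pos via recursive descent over nesting."""
--     if pos + 1 >= len(attrs_str):
--         return "", pos
--     start_tag = attrs_str[pos:pos+2]
--     end_tag = _END_TAG.get(start_tag)
--     if end_tag is None:
--         return "", pos
--     end = _skip_to_close(attrs_str, start_tag, end_tag, pos + 2)
--     return attrs_str[pos:end], end
--
--
-- def _skip_to_close(s, start_tag, end_tag, i):
--     """Scan for the end_tag closing one open block, recursing into nested blocks."""
--     while i < len(s) - 1:
--         pair = s[i:i+2]
--         if pair == end_tag:
--             return i + 2
--         if pair == start_tag:
--             i = _skip_to_close(s, start_tag, end_tag, i + 2)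
--         else:
--             i += 1
--     return i
-- ===== Notes on version B (the rewrite author's own statement) =====
-- stated objective: alternative
-- what changed: Replaces A's explicit nesting counter with recursive descent: a helper scans for the end tag closing one open block and calls itself to skip each nested block, and the tag table is a dict lookup instead of an if/elif chain.
import Mathlib
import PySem

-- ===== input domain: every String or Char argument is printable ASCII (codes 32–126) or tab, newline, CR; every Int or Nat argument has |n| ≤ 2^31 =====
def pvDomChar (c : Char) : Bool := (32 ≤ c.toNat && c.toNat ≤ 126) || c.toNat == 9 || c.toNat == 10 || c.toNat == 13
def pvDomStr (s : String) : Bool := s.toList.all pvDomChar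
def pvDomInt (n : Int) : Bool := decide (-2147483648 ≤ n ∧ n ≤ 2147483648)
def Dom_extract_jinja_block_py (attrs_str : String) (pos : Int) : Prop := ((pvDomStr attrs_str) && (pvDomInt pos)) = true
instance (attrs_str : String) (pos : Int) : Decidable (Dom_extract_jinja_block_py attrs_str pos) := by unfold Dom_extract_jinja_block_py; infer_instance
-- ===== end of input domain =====

-- B replaces A's nesting-counter loop with recursive descent (a helper that skips one nested block per recursive call); return values only, no mutation.


-- ===== PORT A =====
-- while search_pos < len(attrs_str) - 1 and nesting > 0: … (A's scanning loop with its nesting counter).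
-- The Nat argument is fuel, a totality guard only: the loop advances search_pos by ≥ 1 per step, so the
-- callers' fuel (length + |pos| + 2) is never exhausted and the 0-case is unreachable.
def pyLoopA (s st et : List Char) : Nat → Int → Int → Int
  | 0, sp, _ => sp
  | fuel + 1, sp, nesting =>
    if sp < (s.length : Int) - 1 ∧ 0 < nesting then
      if PySem.List.slice s (some sp) (some (sp + 2)) = st then
        pyLoopA s st et fuel (sp + 2) (nesting + 1)
      else if PySem.List.slice s (some sp) (some (sp + 2)) = et then
        pyLoopA s st et fuel (sp + 2) (nesting - 1)
      else
        pyLoopA s st et fuel (sp + 1) nesting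
    else sp

def extract_jinja_block_py (attrs_str : String) (pos : Int) : String × Int :=
  if pos + 1 ≥ (attrs_str.toList.length : Int) then ("", pos)
  else
    if PySem.List.slice attrs_str.toList (some pos) (some (pos + 2)) = ['{', '%'] then
      let r := pyLoopA attrs_str.toList (PySem.List.slice attrs_str.toList (some pos) (some (pos + 2))) ['%', '}']
        (attrs_str.toList.length + pos.natAbs + 2) (pos + 2) 1
      (String.ofList (PySem.List.slice attrs_str.toList (some pos) (some r)), r)
    else if PySem.List.slice attrs_str.toList (some pos) (some (pos + 2)) = ['{', '{'] then
      let r := pyLoopA attrs_str.toList (PySem.List.slice attrs_str.toList (some pos) (some (pos + 2))) ['}', '}']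
        (attrs_str.toList.length + pos.natAbs + 2) (pos + 2) 1
      (String.ofList (PySem.List.slice attrs_str.toList (some pos) (some r)), r)
    else ("", pos)

-- ===== PORT B =====
-- _skip_to_close: while i < len(s) - 1: if pair == end_tag return i + 2; if pair == start_tag recurse past
-- the nested block; else i += 1; return i. The Nat argument is fuel, a totality guard only: every step and
-- every recursive call strictly advances i, so the caller's fuel (length + |pos| + 2) is never exhausted.
def pySkipToClose (s st et : List Char) : Nat → Int → Int
  | 0, i => i
  | fuel + 1, i =>
    if i < (s.length : Int) - 1 then
      if PySem.List.slice s (some i) (some (i + 2)) = et then i + 2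
      else if PySem.List.slice s (some i) (some (i + 2)) = st then
        pySkipToClose s st et fuel (pySkipToClose s st et fuel (i + 2))
      else
        pySkipToClose s st et fuel (i + 1)
    else i

-- module constant _END_TAG = {'{%': '%}', '{{': '}}'}
def pyEndTagDict : PySem.Dict (List Char) (List Char) :=
  PySem.Dict.ofList [(['{', '%'], ['%', '}']), (['{', '{'], ['}', '}'])]

def extract_jinja_block_py_alt (attrs_str : String) (pos : Int) : String × Int :=
  if pos + 1 ≥ (attrs_str.toList.length : Int) then ("", pos)
  else
    match pyEndTagDict.get? (PySem.List.slice attrs_str.toList (some pos) (some (pos + 2))) with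
    | none => ("", pos)
    | some end_tag =>
      let e := pySkipToClose attrs_str.toList (PySem.List.slice attrs_str.toList (some pos) (some (pos + 2)))
        end_tag (attrs_str.toList.length + pos.natAbs + 2) (pos + 2)
      (String.ofList (PySem.List.slice attrs_str.toList (some pos) (some e)), e)

-- ===== PRECONDITION & SPEC =====
def Spec_extract_jinja_block_py (attrs_str : String) (pos : Int) (out : String × Int) : Prop := out = extract_jinja_block_py_alt attrs_str pos
instance (attrs_str : String) (pos : Int) (out : String × Int) : Decidable (Spec_extract_jinja_block_py attrs_str pos out) := by unfold Spec_extract_jinja_block_py; infer_instance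

-- ===== CLAIM (what is proved, stated in full; the proofs are below) =====
def Claim_equal_extract_jinja_block_py : Prop := ∀ (attrs_str : String) (pos : Int), Dom_extract_jinja_block_py attrs_str pos → Spec_extract_jinja_block_py attrs_str pos (extract_jinja_block_py attrs_str pos)

-- ===== LEMMAS AND PROOFS =====

-- A's loop stops immediately when its while-condition fails
lemma pv_loopA_stop (s st et : List Char) (f : Nat) (sp n : Int)
    (h : ¬ (sp < (s.length : Int) - 1 ∧ 0 < n)) : pyLoopA s st et f sp n = sp := by
  cases f with
  | zero => rfl
  | succ f => rw [pyLoopA, if_neg h]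

-- enough fuel: A's loop result does not depend on the exact fuel
lemma pv_loopA_fuel (s st et : List Char) :
    ∀ (f1 f2 : Nat) (sp n : Int), ((s.length : Int) - sp).toNat ≤ f1 →
    ((s.length : Int) - sp).toNat ≤ f2 →
    pyLoopA s st et f1 sp n = pyLoopA s st et f2 sp n := by
  intro f1
  induction f1 with
  | zero =>
    intro f2 sp n h1 h2
    cases f2 with
    | zero => rfl
    | succ f2 => rw [pyLoopA, pyLoopA, if_neg (by omega)]
  | succ f1 ih =>
    intro f2 sp n h1 h2
    cases f2 with
    | zero => rw [pyLoopA, pyLoopA, if_neg (by omega)]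
    | succ f2 =>
      rw [pyLoopA, pyLoopA]
      by_cases hc : sp < (s.length : Int) - 1 ∧ 0 < n
      · rw [if_pos hc, if_pos hc]
        by_cases hst : PySem.List.slice s (some sp) (some (sp + 2)) = st
        · rw [if_pos hst, if_pos hst]
          exact ih f2 (sp + 2) (n + 1) (by omega) (by omega)
        · rw [if_neg hst, if_neg hst]
          by_cases het : PySem.List.slice s (some sp) (some (sp + 2)) = et
          · rw [if_pos het, if_pos het]
            exact ih f2 (sp + 2) (n - 1) (by omega) (by omega)
          · rw [if_neg het, if_neg het]
            exact ih f2 (sp + 1) n (by omega) (by omega)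
      · rw [if_neg hc, if_neg hc]

-- B's helper never moves backwards
lemma pv_skip_ge (s st et : List Char) :
    ∀ (f : Nat) (i : Int), i ≤ pySkipToClose s st et f i := by
  intro f
  induction f with
  | zero => intro i; exact le_refl i
  | succ f ih =>
    intro i
    rw [pySkipToClose]
    split_ifs with hc het hst
    · omega
    · have h1 := ih (i + 2)
      have h2 := ih (pySkipToClose s st et f (i + 2))
      omega
    · have h1 := ih (i + 1)
      omega
    · exact le_refl i

-- the heart of the equivalence: A's counter loop at nesting depth n equals B's helper applied once
-- and the loop resumed at depth n - 1
lemma pv_loopA_skip (s st et : List Char) (hne : st ≠ et) :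
    ∀ (k : Nat) (sp n : Int), 0 < n → ((s.length : Int) - sp).toNat ≤ k →
    ∀ (fa fa' fb : Nat), ((s.length : Int) - sp).toNat ≤ fa → ((s.length : Int) - sp).toNat ≤ fa' →
    ((s.length : Int) - sp).toNat ≤ fb →
    pyLoopA s st et fa sp n = pyLoopA s st et fa' (pySkipToClose s st et fb sp) (n - 1) := by
  intro k
  induction k with
  | zero =>
    intro sp n hn hk fa fa' fb hfa hfa' hfb
    have hend : ¬ sp < (s.length : Int) - 1 := by omega
    rw [pv_loopA_stop s st et fa sp n (by omega)]
    have hskip : pySkipToClose s st et fb sp = sp := by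
      cases fb with
      | zero => rfl
      | succ fb => rw [pySkipToClose, if_neg hend]
    rw [hskip, pv_loopA_stop s st et fa' sp (n - 1) (by omega)]
  | succ k ih =>
    intro sp n hn hk fa fa' fb hfa hfa' hfb
    by_cases hend : sp < (s.length : Int) - 1
    · cases fa with
      | zero => omega
      | succ fa =>
        cases fb with
        | zero => omega
        | succ fb =>
          rw [pyLoopA, if_pos ⟨hend, hn⟩, pySkipToClose, if_pos hend]
          by_cases het : PySem.List.slice s (some sp) (some (sp + 2)) = et
          · have hst : ¬ PySem.List.slice s (some sp) (some (sp + 2)) = st := by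
              rw [het]; exact fun h => hne h.symm
            rw [if_neg hst, if_pos het, if_pos het]
            exact pv_loopA_fuel s st et fa fa' (sp + 2) (n - 1) (by omega) (by omega)
          · rw [if_neg het, if_neg het]
            by_cases hst : PySem.List.slice s (some sp) (some (sp + 2)) = st
            · rw [if_pos hst, if_pos hst]
              have step1 : pyLoopA s st et fa (sp + 2) (n + 1) =
                  pyLoopA s st et fa' (pySkipToClose s st et fb (sp + 2)) n := by
                have := ih (sp + 2) (n + 1) (by omega) (by omega) fa fa' fb
                  (by omega) (by omega) (by omega)
                simpa using this
              have hj := pv_skip_ge s st et fb (sp + 2)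
              rw [step1]
              exact ih (pySkipToClose s st et fb (sp + 2)) n hn (by omega) fa' fa' fb
                (by omega) (by omega) (by omega)
            · rw [if_neg hst, if_neg hst]
              exact ih (sp + 1) n hn (by omega) fa fa' fb (by omega) (by omega) (by omega)
    · rw [pv_loopA_stop s st et fa sp n (by omega)]
      have hskip : pySkipToClose s st et fb sp = sp := by
        cases fb with
        | zero => rfl
        | succ fb => rw [pySkipToClose, if_neg hend]
      rw [hskip, pv_loopA_stop s st et fa' sp (n - 1) (by omega)]

-- at the top level (nesting = 1) the two results coincide
lemma pv_top (s st et : List Char) (hne : st ≠ et) (sp : Int) (f : Nat)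
    (h : ((s.length : Int) - sp).toNat ≤ f) :
    pyLoopA s st et f sp 1 = pySkipToClose s st et f sp := by
  have := pv_loopA_skip s st et hne (((s.length : Int) - sp).toNat) sp 1 (by omega) le_rfl
    f f f h h h
  rw [this]
  have hj := pv_skip_ge s st et f sp
  exact pv_loopA_stop s st et f (pySkipToClose s st et f sp) (1 - 1) (by omega)

-- ===== VERDICT (by name: the statement is the Claim_ definition above) =====
theorem extract_jinja_block_py_spec : Claim_equal_extract_jinja_block_py := by
  intro attrs_str pos hdom
  unfold Spec_extract_jinja_block_py
  unfold extract_jinja_block_py extract_jinja_block_py_alt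
  by_cases hg : pos + 1 ≥ (attrs_str.toList.length : Int)
  · rw [if_pos hg, if_pos hg]
  · rw [if_neg hg, if_neg hg]
    by_cases h1 : PySem.List.slice attrs_str.toList (some pos) (some (pos + 2)) = ['{', '%']
    · have hget : pyEndTagDict.get? (['{', '%'] : List Char) = some ['%', '}'] := by decide
      rw [if_pos h1, h1, hget,
        pv_top attrs_str.toList ['{', '%'] ['%', '}'] (by decide) (pos + 2)
          (attrs_str.toList.length + pos.natAbs + 2) (by omega)]
    · rw [if_neg h1]
      by_cases h2 : PySem.List.slice attrs_str.toList (some pos) (some (pos + 2)) = ['{', '{']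
      · have hget : pyEndTagDict.get? (['{', '{'] : List Char) = some ['}', '}'] := by decide
        rw [if_pos h2, h2, hget,
          pv_top attrs_str.toList ['{', '{'] ['}', '}'] (by decide) (pos + 2)
            (attrs_str.toList.length + pos.natAbs + 2) (by omega)]
      · have hget : pyEndTagDict.get? (PySem.List.slice attrs_str.toList (some pos) (some (pos + 2))) = none := by
          have hmk : pyEndTagDict = PySem.Dict.mk [(['{', '%'], ['%', '}']), (['{', '{'], ['}', '}'])] := by decide
          rw [hmk]
          simp only [PySem.Dict.get?_mk_cons, beq_iff_eq]
          rw [if_neg (fun h => h1 h.symm), if_neg (fun h => h2 h.symm)]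
          rfl
        rw [if_neg h2, hget]
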